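-- pv_equiv track=rewrite | github.com/lal4lal/TUBES-TBA | token_recognizer.py | check_predikat
-- ===== SOURCE A (Python) =====
-- def check_predikat(input_string):
--     state = predikat_initial_states
--     for char in input_string:
--         if (state, char) in predikat_transitions:
--             state = predikat_transitions[(state, char)]
--         else:
--             return False
--     return state in predikat_accept_states
--
-- predikat_transitions = {
--     # m, e, n, l, i, t, g, a, j, r, h, t, u, k, b
--     ('q0', 'm'): 'q1', ('q0', 'b'): 'q22',
--     ('q1', 'e'): 'q2',
--     ('q2', 'n'): 'q3',
--     ('q3', 'e'): 'q4', ('q3', 'g'): 'q9',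
--     ('q4', 'l'): 'q5',
--     ('q5', 'i'): 'q6',
--     ('q6', 't'): 'q7',
--     ('q7', 'i'): 'q8',
--     ('q9', 'k'): 'q10', ('q9', 'a'): 'q12', ('q9', 'h'): 'q16',
--     ('q10', 'a'): 'q11',
--     ('q11', 'j'): 'q7',
--     ('q12', 'j'): 'q13',
--     ('q13', 'a'): 'q14',
--     ('q14', 'r'): 'q15',
--     ('q16', 'i'): 'q17',
--     ('q17', 't'): 'q18',
--     ('q18', 'u'): 'q19',
--     ('q19', 'n'): 'q20',
--     ('q20', 'g'): 'q21',
--     ('q22', 'e'): 'q23',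
--     ('q23', 'r'): 'q24',
--     ('q24', 'l'): 'q25',
--     ('q25', 'a'): 'q26',
--     ('q26', 't'): 'q27',
--     ('q27', 'i'): 'q28',
--     ('q28', 'h'): 'q29'
-- }
--
-- predikat_accept_states = {'q8', 'q15', 'q21', 'q29'}
--
-- predikat_initial_states = 'q0'
-- ===== SOURCE B (Python) =====
-- def check_predikat(input_string):
--     return input_string in {"meneliti", "mengkaji", "mengajar", "menghitung", "berlatih"}
-- ===== Notes on version B (the rewrite author's own statement) =====
-- stated objective: simpler
-- what changed: The per-character DFA transition loop is replaced by a single membership test of the whole string in the literal five-word language the automaton accepts.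
import Mathlib
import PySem

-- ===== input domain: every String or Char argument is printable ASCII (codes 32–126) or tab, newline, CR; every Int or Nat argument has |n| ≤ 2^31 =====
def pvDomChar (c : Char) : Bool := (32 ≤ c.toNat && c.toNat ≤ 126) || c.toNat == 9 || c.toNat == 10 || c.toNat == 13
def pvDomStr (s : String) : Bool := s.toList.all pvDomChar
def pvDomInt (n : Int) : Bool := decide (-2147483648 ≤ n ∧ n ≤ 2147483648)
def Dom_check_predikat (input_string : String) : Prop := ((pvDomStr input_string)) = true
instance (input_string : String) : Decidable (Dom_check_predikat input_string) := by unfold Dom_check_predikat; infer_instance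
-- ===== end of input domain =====

-- B replaces the per-character DFA loop by one membership test in the automaton's literal five-word language (simpler).
-- ===== PORT A =====
def predikat_transitions : PySem.Dict (String × Char) String := PySem.Dict.ofList [
  (("q0", 'm'), "q1"),
  (("q0", 'b'), "q22"),
  (("q1", 'e'), "q2"),
  (("q2", 'n'), "q3"),
  (("q3", 'e'), "q4"),
  (("q3", 'g'), "q9"),
  (("q4", 'l'), "q5"),
  (("q5", 'i'), "q6"),
  (("q6", 't'), "q7"),
  (("q7", 'i'), "q8"),
  (("q9", 'k'), "q10"),
  (("q9", 'a'), "q12"),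
  (("q9", 'h'), "q16"),
  (("q10", 'a'), "q11"),
  (("q11", 'j'), "q7"),
  (("q12", 'j'), "q13"),
  (("q13", 'a'), "q14"),
  (("q14", 'r'), "q15"),
  (("q16", 'i'), "q17"),
  (("q17", 't'), "q18"),
  (("q18", 'u'), "q19"),
  (("q19", 'n'), "q20"),
  (("q20", 'g'), "q21"),
  (("q22", 'e'), "q23"),
  (("q23", 'r'), "q24"),
  (("q24", 'l'), "q25"),
  (("q25", 'a'), "q26"),
  (("q26", 't'), "q27"),
  (("q27", 'i'), "q28"),
  (("q28", 'h'), "q29")]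

def predikat_accept_states : PySem.Set String := PySem.Set.ofList ["q8", "q15", "q21", "q29"]

def predikat_initial_states : String := "q0"

def checkLoop : List Char → String → Bool
  | [], state => predikat_accept_states.contains state
  | c :: rest, state =>
    match predikat_transitions.get? (state, c) with
    | some st' => checkLoop rest st'
    | none => false

def check_predikat (input_string : String) : Bool :=
  checkLoop input_string.toList predikat_initial_states

-- ===== PORT B =====
def predikat_words : PySem.Set String :=
  PySem.Set.ofList ["meneliti", "mengkaji", "mengajar", "menghitung", "berlatih"]

def check_predikat_alt (input_string : String) : Bool :=
  predikat_words.contains input_string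

-- ===== PRECONDITION & SPEC =====
def Spec_check_predikat (input_string : String) (out : Bool) : Prop := out = check_predikat_alt input_string
instance (input_string : String) (out : Bool) : Decidable (Spec_check_predikat input_string out) := by unfold Spec_check_predikat; infer_instance

-- ===== CLAIM (what is proved, stated in full; the proofs are below) =====
def Claim_equal_check_predikat : Prop := ∀ (input_string : String), Dom_check_predikat input_string → Spec_check_predikat input_string (check_predikat input_string)

-- ===== LEMMAS AND PROOFS =====

-- suffix language of each DFA state: the words accepted by A's automaton starting from that state
def suff : String → List (List Char)
| "q0" => [['m', 'e', 'n', 'e', 'l', 'i', 't', 'i'], ['m', 'e', 'n', 'g', 'k', 'a', 'j', 'i'], ['m', 'e', 'n', 'g', 'a', 'j', 'a', 'r'], ['m', 'e', 'n', 'g', 'h', 'i', 't', 'u', 'n', 'g'], ['b', 'e', 'r', 'l', 'a', 't', 'i', 'h']]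
| "q1" => [['e', 'n', 'e', 'l', 'i', 't', 'i'], ['e', 'n', 'g', 'k', 'a', 'j', 'i'], ['e', 'n', 'g', 'a', 'j', 'a', 'r'], ['e', 'n', 'g', 'h', 'i', 't', 'u', 'n', 'g']]
| "q2" => [['n', 'e', 'l', 'i', 't', 'i'], ['n', 'g', 'k', 'a', 'j', 'i'], ['n', 'g', 'a', 'j', 'a', 'r'], ['n', 'g', 'h', 'i', 't', 'u', 'n', 'g']]
| "q3" => [['e', 'l', 'i', 't', 'i'], ['g', 'k', 'a', 'j', 'i'], ['g', 'a', 'j', 'a', 'r'], ['g', 'h', 'i', 't', 'u', 'n', 'g']]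
| "q4" => [['l', 'i', 't', 'i']]
| "q5" => [['i', 't', 'i']]
| "q6" => [['t', 'i']]
| "q7" => [['i']]
| "q8" => [[]]
| "q9" => [['k', 'a', 'j', 'i'], ['a', 'j', 'a', 'r'], ['h', 'i', 't', 'u', 'n', 'g']]
| "q10" => [['a', 'j', 'i']]
| "q11" => [['j', 'i']]
| "q12" => [['j', 'a', 'r']]
| "q13" => [['a', 'r']]
| "q14" => [['r']]
| "q15" => [[]]
| "q16" => [['i', 't', 'u', 'n', 'g']]
| "q17" => [['t', 'u', 'n', 'g']]
| "q18" => [['u', 'n', 'g']]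
| "q19" => [['n', 'g']]
| "q20" => [['g']]
| "q21" => [[]]
| "q22" => [['e', 'r', 'l', 'a', 't', 'i', 'h']]
| "q23" => [['r', 'l', 'a', 't', 'i', 'h']]
| "q24" => [['l', 'a', 't', 'i', 'h']]
| "q25" => [['a', 't', 'i', 'h']]
| "q26" => [['t', 'i', 'h']]
| "q27" => [['i', 'h']]
| "q28" => [['h']]
| "q29" => [[]]
| _ => []

-- the transition dict as a literal association list (all 30 keys are distinct)
lemma trans_mk : predikat_transitions = PySem.Dict.mk [
  (("q0", 'm'), "q1"),
  (("q0", 'b'), "q22"),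
  (("q1", 'e'), "q2"),
  (("q2", 'n'), "q3"),
  (("q3", 'e'), "q4"),
  (("q3", 'g'), "q9"),
  (("q4", 'l'), "q5"),
  (("q5", 'i'), "q6"),
  (("q6", 't'), "q7"),
  (("q7", 'i'), "q8"),
  (("q9", 'k'), "q10"),
  (("q9", 'a'), "q12"),
  (("q9", 'h'), "q16"),
  (("q10", 'a'), "q11"),
  (("q11", 'j'), "q7"),
  (("q12", 'j'), "q13"),
  (("q13", 'a'), "q14"),
  (("q14", 'r'), "q15"),
  (("q16", 'i'), "q17"),
  (("q17", 't'), "q18"),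
  (("q18", 'u'), "q19"),
  (("q19", 'n'), "q20"),
  (("q20", 'g'), "q21"),
  (("q22", 'e'), "q23"),
  (("q23", 'r'), "q24"),
  (("q24", 'l'), "q25"),
  (("q25", 'a'), "q26"),
  (("q26", 't'), "q27"),
  (("q27", 'i'), "q28"),
  (("q28", 'h'), "q29")] := by decide

-- checkLoop from state st accepts exactly the suffix language of st
lemma checkLoop_eq_suff : ∀ (cs : List Char) (st : String), checkLoop cs st = (suff st).contains cs := by
  intro cs
  induction cs with
  | nil =>
    intro st
    unfold suff
    split <;> first
      | rfl
      | (rename_i h1 h2 h3 h4 h5 h6 h7 h8 h9 h10 h11 h12 h13 h14 h15 h16 h17 h18 h19 h20 h21 h22 h23 h24 h25 h26 h27 h28 h29 h30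
         simp [checkLoop, predikat_accept_states, PySem.Set.contains, *]
         exact ⟨h9, h16, h22, h30⟩)
  | cons c rest ih =>
    intro st
    unfold suff
    split
    case _ =>
      by_cases h1 : c = 'm'
      · subst h1
        simp [checkLoop, trans_mk, PySem.Dict.get?, ih, suff]
      ·
        by_cases h2 : c = 'b'
        · subst h2
          simp [checkLoop, trans_mk, PySem.Dict.get?, ih, suff]
        ·
          simp [checkLoop, trans_mk, PySem.Dict.get?, Ne.symm h1, h1, Ne.symm h2, h2]
    case _ =>
      by_cases h1 : c = 'e'
      · subst h1
        simp [checkLoop, trans_mk, PySem.Dict.get?, ih, suff]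
      ·
        simp [checkLoop, trans_mk, PySem.Dict.get?, Ne.symm h1, h1]
    case _ =>
      by_cases h1 : c = 'n'
      · subst h1
        simp [checkLoop, trans_mk, PySem.Dict.get?, ih, suff]
      ·
        simp [checkLoop, trans_mk, PySem.Dict.get?, Ne.symm h1, h1]
    case _ =>
      by_cases h1 : c = 'e'
      · subst h1
        simp [checkLoop, trans_mk, PySem.Dict.get?, ih, suff]
      ·
        by_cases h2 : c = 'g'
        · subst h2
          simp [checkLoop, trans_mk, PySem.Dict.get?, ih, suff]
        ·
          simp [checkLoop, trans_mk, PySem.Dict.get?, Ne.symm h1, h1, Ne.symm h2, h2]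
    case _ =>
      by_cases h1 : c = 'l'
      · subst h1
        simp [checkLoop, trans_mk, PySem.Dict.get?, ih, suff]
      ·
        simp [checkLoop, trans_mk, PySem.Dict.get?, Ne.symm h1, h1]
    case _ =>
      by_cases h1 : c = 'i'
      · subst h1
        simp [checkLoop, trans_mk, PySem.Dict.get?, ih, suff]
      ·
        simp [checkLoop, trans_mk, PySem.Dict.get?, Ne.symm h1, h1]
    case _ =>
      by_cases h1 : c = 't'
      · subst h1
        simp [checkLoop, trans_mk, PySem.Dict.get?, ih, suff]
      ·
        simp [checkLoop, trans_mk, PySem.Dict.get?, Ne.symm h1, h1]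
    case _ =>
      by_cases h1 : c = 'i'
      · subst h1
        simp [checkLoop, trans_mk, PySem.Dict.get?, ih, suff]
      ·
        simp [checkLoop, trans_mk, PySem.Dict.get?, Ne.symm h1, h1]
    case _ =>
      simp [checkLoop, trans_mk, PySem.Dict.get?]
    case _ =>
      by_cases h1 : c = 'k'
      · subst h1
        simp [checkLoop, trans_mk, PySem.Dict.get?, ih, suff]
      ·
        by_cases h2 : c = 'a'
        · subst h2
          simp [checkLoop, trans_mk, PySem.Dict.get?, ih, suff]
        ·
          by_cases h3 : c = 'h'
          · subst h3
            simp [checkLoop, trans_mk, PySem.Dict.get?, ih, suff]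
          ·
            simp [checkLoop, trans_mk, PySem.Dict.get?, Ne.symm h1, h1, Ne.symm h2, h2, Ne.symm h3, h3]
    case _ =>
      by_cases h1 : c = 'a'
      · subst h1
        simp [checkLoop, trans_mk, PySem.Dict.get?, ih, suff]
      ·
        simp [checkLoop, trans_mk, PySem.Dict.get?, Ne.symm h1, h1]
    case _ =>
      by_cases h1 : c = 'j'
      · subst h1
        simp [checkLoop, trans_mk, PySem.Dict.get?, ih, suff]
      ·
        simp [checkLoop, trans_mk, PySem.Dict.get?, Ne.symm h1, h1]
    case _ =>
      by_cases h1 : c = 'j'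
      · subst h1
        simp [checkLoop, trans_mk, PySem.Dict.get?, ih, suff]
      ·
        simp [checkLoop, trans_mk, PySem.Dict.get?, Ne.symm h1, h1]
    case _ =>
      by_cases h1 : c = 'a'
      · subst h1
        simp [checkLoop, trans_mk, PySem.Dict.get?, ih, suff]
      ·
        simp [checkLoop, trans_mk, PySem.Dict.get?, Ne.symm h1, h1]
    case _ =>
      by_cases h1 : c = 'r'
      · subst h1
        simp [checkLoop, trans_mk, PySem.Dict.get?, ih, suff]
      ·
        simp [checkLoop, trans_mk, PySem.Dict.get?, Ne.symm h1, h1]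
    case _ =>
      simp [checkLoop, trans_mk, PySem.Dict.get?]
    case _ =>
      by_cases h1 : c = 'i'
      · subst h1
        simp [checkLoop, trans_mk, PySem.Dict.get?, ih, suff]
      ·
        simp [checkLoop, trans_mk, PySem.Dict.get?, Ne.symm h1, h1]
    case _ =>
      by_cases h1 : c = 't'
      · subst h1
        simp [checkLoop, trans_mk, PySem.Dict.get?, ih, suff]
      ·
        simp [checkLoop, trans_mk, PySem.Dict.get?, Ne.symm h1, h1]
    case _ =>
      by_cases h1 : c = 'u'
      · subst h1
        simp [checkLoop, trans_mk, PySem.Dict.get?, ih, suff]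
      ·
        simp [checkLoop, trans_mk, PySem.Dict.get?, Ne.symm h1, h1]
    case _ =>
      by_cases h1 : c = 'n'
      · subst h1
        simp [checkLoop, trans_mk, PySem.Dict.get?, ih, suff]
      ·
        simp [checkLoop, trans_mk, PySem.Dict.get?, Ne.symm h1, h1]
    case _ =>
      by_cases h1 : c = 'g'
      · subst h1
        simp [checkLoop, trans_mk, PySem.Dict.get?, ih, suff]
      ·
        simp [checkLoop, trans_mk, PySem.Dict.get?, Ne.symm h1, h1]
    case _ =>
      simp [checkLoop, trans_mk, PySem.Dict.get?]
    case _ =>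
      by_cases h1 : c = 'e'
      · subst h1
        simp [checkLoop, trans_mk, PySem.Dict.get?, ih, suff]
      ·
        simp [checkLoop, trans_mk, PySem.Dict.get?, Ne.symm h1, h1]
    case _ =>
      by_cases h1 : c = 'r'
      · subst h1
        simp [checkLoop, trans_mk, PySem.Dict.get?, ih, suff]
      ·
        simp [checkLoop, trans_mk, PySem.Dict.get?, Ne.symm h1, h1]
    case _ =>
      by_cases h1 : c = 'l'
      · subst h1
        simp [checkLoop, trans_mk, PySem.Dict.get?, ih, suff]
      ·
        simp [checkLoop, trans_mk, PySem.Dict.get?, Ne.symm h1, h1]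
    case _ =>
      by_cases h1 : c = 'a'
      · subst h1
        simp [checkLoop, trans_mk, PySem.Dict.get?, ih, suff]
      ·
        simp [checkLoop, trans_mk, PySem.Dict.get?, Ne.symm h1, h1]
    case _ =>
      by_cases h1 : c = 't'
      · subst h1
        simp [checkLoop, trans_mk, PySem.Dict.get?, ih, suff]
      ·
        simp [checkLoop, trans_mk, PySem.Dict.get?, Ne.symm h1, h1]
    case _ =>
      by_cases h1 : c = 'i'
      · subst h1
        simp [checkLoop, trans_mk, PySem.Dict.get?, ih, suff]
      ·
        simp [checkLoop, trans_mk, PySem.Dict.get?, Ne.symm h1, h1]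
    case _ =>
      by_cases h1 : c = 'h'
      · subst h1
        simp [checkLoop, trans_mk, PySem.Dict.get?, ih, suff]
      ·
        simp [checkLoop, trans_mk, PySem.Dict.get?, Ne.symm h1, h1]
    case _ =>
      simp [checkLoop, trans_mk, PySem.Dict.get?]
    case _ =>
      rename_i h1 h2 h3 h4 h5 h6 h7 h8 h9 h10 h11 h12 h13 h14 h15 h16 h17 h18 h19 h20 h21 h22 h23 h24 h25 h26 h27 h28 h29 h30
      simp [checkLoop, trans_mk, PySem.Dict.get?, Ne.symm h1, Ne.symm h2, Ne.symm h3, Ne.symm h4, Ne.symm h5, Ne.symm h6, Ne.symm h7, Ne.symm h8, Ne.symm h9, Ne.symm h10, Ne.symm h11, Ne.symm h12, Ne.symm h13, Ne.symm h14, Ne.symm h15, Ne.symm h16, Ne.symm h17, Ne.symm h18, Ne.symm h19, Ne.symm h20, Ne.symm h21, Ne.symm h22, Ne.symm h23, Ne.symm h24, Ne.symm h25, Ne.symm h26, Ne.symm h27, Ne.symm h28, Ne.symm h29, Ne.symm h30]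

-- ===== VERDICT (by name: the statement is the Claim_ definition above) =====
theorem check_predikat_spec : Claim_equal_check_predikat := by
  intro s _
  show check_predikat s = check_predikat_alt s
  rw [check_predikat, checkLoop_eq_suff]
  simp [suff, predikat_initial_states, check_predikat_alt, predikat_words, PySem.Set.contains,
        PySem.Set.ofList, ← String.toList_inj]
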